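-- pv_equiv track=rewrite | github.com/Alxmis/Least-Squares | Cramer_and_Inv_matrix.py | CreateFreeCoefMat
-- ===== SOURCE A (Python) =====
-- def CreateFreeCoefMat(X, Y, N, M):
--     result = []
--     for i in range(N-1):
--         sum = 0
--         for j in range(M):
--             sum+=X[j][i]*Y[j]
--         result.append(sum*2)
--     suml = 0
--     for i in range(M):
--         suml+=Y[i]
--     result.append(2*suml)
--     return result
-- ===== SOURCE B (Python) =====
-- def CreateFreeCoefMat(X, Y, N, M):
--     # single pass over rows: maintain a vector accumulator per column plus the running Y-sum
--     acc = [0] * (N - 1)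
--     suml = 0
--     for j in range(M):
--         yj = Y[j]
--         acc = [a + X[j][i] * yj for i, a in enumerate(acc)]
--         suml += yj
--     return [2 * a for a in acc] + [2 * suml]
-- ===== Notes on version B (the rewrite author's own statement) =====
-- stated objective: alternative
-- what changed: Replaces A's column-outer nested loops (each column sum recomputed by a separate pass over all rows) with a single pass over rows maintaining a vector accumulator for all columns plus the running Y-sum, doubling everything at the end.
import Mathlib
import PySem

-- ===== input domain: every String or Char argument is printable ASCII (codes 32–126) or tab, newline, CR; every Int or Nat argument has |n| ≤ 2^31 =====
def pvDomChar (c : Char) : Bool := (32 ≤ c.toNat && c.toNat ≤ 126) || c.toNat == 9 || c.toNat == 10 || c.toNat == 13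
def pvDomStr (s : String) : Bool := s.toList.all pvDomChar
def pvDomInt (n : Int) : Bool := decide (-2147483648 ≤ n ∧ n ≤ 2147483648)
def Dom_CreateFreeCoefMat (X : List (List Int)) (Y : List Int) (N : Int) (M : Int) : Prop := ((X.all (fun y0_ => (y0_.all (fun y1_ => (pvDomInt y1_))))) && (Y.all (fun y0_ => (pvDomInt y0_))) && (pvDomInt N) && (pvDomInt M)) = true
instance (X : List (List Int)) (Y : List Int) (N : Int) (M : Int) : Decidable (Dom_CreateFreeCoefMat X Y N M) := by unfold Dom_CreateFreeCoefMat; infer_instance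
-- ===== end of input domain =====

-- B replaces A's column-outer nested passes by one pass over rows with a vector accumulator (alternative decomposition, same cost).

-- ===== PORT A =====
def CreateFreeCoefMat (X : List (List Int)) (Y : List Int) (N : Int) (M : Int) : List Int :=
  let result : List Int :=
    (PySem.List.pyRange 0 (N - 1) 1).foldl
      (fun result i =>
        let sum : Int :=
          (PySem.List.pyRange 0 M 1).foldl
            (fun sum j =>
              sum + PySem.List.pyGetD (PySem.List.pyGetD X j []) i 0 * PySem.List.pyGetD Y j 0)
            0
        result ++ [sum * 2])
      []
  let suml : Int :=
    (PySem.List.pyRange 0 M 1).foldl (fun suml i => suml + PySem.List.pyGetD Y i 0) 0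
  result ++ [2 * suml]

-- ===== PORT B =====
def CreateFreeCoefMat_alt (X : List (List Int)) (Y : List Int) (N : Int) (M : Int) : List Int :=
  let st : List Int × Int :=
    (PySem.List.pyRange 0 M 1).foldl
      (fun (st : List Int × Int) j =>
        let yj : Int := PySem.List.pyGetD Y j 0
        let acc : List Int :=
          (PySem.List.enumerate st.1).map
            (fun p => p.2 + PySem.List.pyGetD (PySem.List.pyGetD X j []) p.1 0 * yj)
        (acc, st.2 + yj))
      (List.replicate (N - 1).toNat 0, 0)
  st.1.map (fun a => 2 * a) ++ [2 * st.2]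

-- ===== PRECONDITION & SPEC =====
-- Pre_ excludes exactly the inputs where Python A raises IndexError: it needs Y[j] for all j < M,
-- and (when N ≥ 2) X[j] for all j < M with each such row at least N-1 long.
def Pre_CreateFreeCoefMat (X : List (List Int)) (Y : List Int) (N : Int) (M : Int) : Prop :=
  M.toNat ≤ Y.length ∧
    (1 < N → M.toNat ≤ X.length ∧ ∀ row ∈ X.take M.toNat, (N - 1).toNat ≤ row.length)
instance (X : List (List Int)) (Y : List Int) (N : Int) (M : Int) : Decidable (Pre_CreateFreeCoefMat X Y N M) := by unfold Pre_CreateFreeCoefMat; infer_instance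
def pvWitness_CreateFreeCoefMat : List (List Int) × List Int × Int × Int :=
  ([[1, 2], [3, 4]], [5, 6], 3, 2)
def Spec_CreateFreeCoefMat (X : List (List Int)) (Y : List Int) (N : Int) (M : Int) (out : List Int) : Prop := out = CreateFreeCoefMat_alt X Y N M
instance (X : List (List Int)) (Y : List Int) (N : Int) (M : Int) (out : List Int) : Decidable (Spec_CreateFreeCoefMat X Y N M out) := by unfold Spec_CreateFreeCoefMat; infer_instance

-- ===== CLAIM (what is proved, stated in full; the proofs are below) =====
def Claim_equal_CreateFreeCoefMat : Prop := ∀ (X : List (List Int)) (Y : List Int) (N : Int) (M : Int), Dom_CreateFreeCoefMat X Y N M → Pre_CreateFreeCoefMat X Y N M → Spec_CreateFreeCoefMat X Y N M (CreateFreeCoefMat X Y N M)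

-- ===== LEMMAS AND PROOFS =====

-- enumerating a list that is itself an index-dependent map of an enumeration keeps the indices
theorem pv_enumerate_map_enumerate (h : Int → Int) :
    ∀ (l : List Int) (s : Int),
      PySem.List.enumerate ((PySem.List.enumerate l s).map (fun p => p.2 + h p.1)) s
        = (PySem.List.enumerate l s).map (fun p => (p.1, p.2 + h p.1)) := by
  intro l
  induction l with
  | nil => intro s; simp [PySem.List.enumerate_nil]
  | cons a l ih =>
      intro s
      simp [PySem.List.enumerate_cons, ih (s + 1)]

-- B's row loop invariant: after folding over any row list, the accumulator holds, at index i,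
-- its start value plus the sum over the rows of X[j][i]*Y[j], and the scalar holds s plus ΣY[j].
theorem pv_loop_inv (X : List (List Int)) (Y : List Int) :
    ∀ (rows : List Int) (acc : List Int) (s : Int),
      rows.foldl
        (fun (st : List Int × Int) j =>
          let yj : Int := PySem.List.pyGetD Y j 0
          let acc :=
            (PySem.List.enumerate st.1).map
              (fun p => p.2 + PySem.List.pyGetD (PySem.List.pyGetD X j []) p.1 0 * yj)
          (acc, st.2 + yj)) (acc, s)
      = ((PySem.List.enumerate acc).map
           (fun p => p.2 + (rows.map
              (fun j => PySem.List.pyGetD (PySem.List.pyGetD X j []) p.1 0 * PySem.List.pyGetD Y j 0)).sum),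
         s + (rows.map (fun j => PySem.List.pyGetD Y j 0)).sum) := by
  intro rows
  induction rows with
  | nil =>
      intro acc s
      simp [PySem.List.map_snd_enumerate]
  | cons j rows ih =>
      intro acc s
      simp only [List.foldl_cons]
      rw [ih]
      rw [pv_enumerate_map_enumerate
            (fun i => PySem.List.pyGetD (PySem.List.pyGetD X j []) i 0 * PySem.List.pyGetD Y j 0)]
      simp only [List.map_map, List.map_cons, List.sum_cons]
      refine congrArg₂ Prod.mk ?_ ?_
      · apply List.map_congr_left
        intro p _
        simp [Function.comp, add_assoc]
      · ring

-- pyGetD on a replicate-0 list is always 0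
theorem pv_pyGetD_replicate_zero (n : Nat) (j : Int) :
    PySem.List.pyGetD (List.replicate n (0 : Int)) j 0 = 0 := by
  simp only [PySem.List.pyGetD, PySem.List.pyGet?, PySem.List.pyIdx?]
  split_ifs <;> simp [List.getElem?_replicate] <;> split_ifs <;> simp

-- range 0 (N-1) over Int equals range 0 over its toNat
theorem pv_pyRange_toNat (k : Int) :
    PySem.List.pyRange 0 k 1 = PySem.List.pyRange 0 ((k.toNat : Int)) 1 := by
  rw [PySem.List.pyRange_one, PySem.List.pyRange_one]
  have h : (k - 0).toNat = ((k.toNat : Int) - 0).toNat := by omega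
  rw [h]

-- ===== VERDICT (by name: the statement is the Claim_ definition above) =====
theorem CreateFreeCoefMat_spec : Claim_equal_CreateFreeCoefMat := by
  intro X Y N M _ _
  unfold Spec_CreateFreeCoefMat CreateFreeCoefMat CreateFreeCoefMat_alt
  simp only []
  rw [pv_loop_inv X Y (PySem.List.pyRange 0 M 1) (List.replicate (N - 1).toNat 0) 0]
  rw [PySem.List.foldl_append_singleton_eq_map]
  rw [PySem.List.enumerate_eq_map_pyRange (d := (0 : Int))]
  simp only [List.map_map, List.length_replicate, List.nil_append, PySem.List.len_eq]
  congr 1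
  · rw [pv_pyRange_toNat (N - 1), PySem.List.pyRange_zero_natCast]
    apply List.map_congr_left
    intro i _
    rw [PySem.List.foldl_add]
    simp [pv_pyGetD_replicate_zero, mul_comm]
  · rw [PySem.List.foldl_add]
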